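-- pv_equiv track=rewrite | github.com/JakeEhrlich/CXEMA | scripts/generate_test_vectors.py | sim_cx195
-- ===== SOURCE A (Python) =====
-- def sim_cx195(inputs: dict, n_ticks: int) -> dict:
--     """CX195: 4-bit shift register
--     On rising edge of CLK:
--       DIN -> Q0 -> Q1 -> Q2 -> Q3
--     """
--     q0, q1, q2, q3 = [0] * n_ticks, [0] * n_ticks, [0] * n_ticks, [0] * n_ticks
--     reg = [0, 0, 0, 0]  # Q0, Q1, Q2, Q3
--     prev_clk = 0
--     for t in range(n_ticks):
--         clk = inputs['CLK'][t]
--         din = inputs['DIN'][t]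
--         if clk and not prev_clk:  # Rising edge
--             reg = [din, reg[0], reg[1], reg[2]]
--         q0[t], q1[t], q2[t], q3[t] = reg
--         prev_clk = clk
--     return {'Q0': q0, 'Q1': q1, 'Q2': q2, 'Q3': q3}
-- ===== SOURCE B (Python) =====
-- def sim_cx195(inputs: dict, n_ticks: int) -> dict:
--     """CX195: 4-bit shift register, via a grow-only history of latched values."""
--     latched = []
--     counts = []
--     prev_clk = 0
--     for t in range(n_ticks):
--         clk = inputs['CLK'][t]
--         din = inputs['DIN'][t]
--         if clk and not prev_clk:
--             latched.append(din)
--         counts.append(len(latched))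
--         prev_clk = clk
--
--     def q(i):
--         return [latched[c - 1 - i] if c - 1 - i >= 0 else 0 for c in counts]
--
--     return {'Q0': q(0), 'Q1': q(1), 'Q2': q(2), 'Q3': q(3)}
-- ===== Notes on version B (the rewrite author's own statement) =====
-- stated objective: alternative
-- what changed: B replaces the shifting 4-element register updated every tick with a grow-only history of latched DIN values plus per-tick rising-edge counts, and builds each output array afterwards by indexed lookup into that history (Q_i[t] = latched[count[t]-1-i] or 0).
import Mathlib
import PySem

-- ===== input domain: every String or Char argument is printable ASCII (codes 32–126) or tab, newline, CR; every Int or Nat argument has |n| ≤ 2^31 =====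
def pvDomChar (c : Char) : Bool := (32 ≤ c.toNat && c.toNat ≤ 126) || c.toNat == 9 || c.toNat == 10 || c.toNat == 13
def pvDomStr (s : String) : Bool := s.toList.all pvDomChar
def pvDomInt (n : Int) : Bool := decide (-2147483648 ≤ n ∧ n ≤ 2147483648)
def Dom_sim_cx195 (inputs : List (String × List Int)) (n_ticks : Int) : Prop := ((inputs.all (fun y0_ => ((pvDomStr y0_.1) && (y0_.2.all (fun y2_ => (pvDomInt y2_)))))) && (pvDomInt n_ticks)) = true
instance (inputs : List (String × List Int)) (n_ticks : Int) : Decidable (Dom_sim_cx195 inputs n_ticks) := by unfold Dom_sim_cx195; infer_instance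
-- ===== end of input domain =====

-- B replaces the per-tick shifting 4-slot register with a grow-only history of latched
-- DIN values plus per-tick rising-edge counts, reading each output back by indexed lookup
-- (alternative decomposition; same asymptotic cost).

-- ===== PORT A =====
-- A's loop: per tick, inputs['CLK'][t] / inputs['DIN'][t] (none = KeyError/IndexError),
-- shift the register on a rising edge, write it into the preallocated arrays at index t.
def simALoop (inputs : List (String × List Int)) :
    List Int → (List Int × List Int × List Int × List Int) →
    (Int × Int × Int × Int) → Int → Option (List Int × List Int × List Int × List Int)
  | [], qs, _, _ => some qs
  | t :: ts, (q0, q1, q2, q3), reg, prev_clk =>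
    match ((PySem.Dict.mk inputs).get? "CLK").bind (fun l => PySem.List.pyGet? l t),
          ((PySem.Dict.mk inputs).get? "DIN").bind (fun l => PySem.List.pyGet? l t) with
    | some clk, some din =>
      let reg' := if clk ≠ 0 ∧ prev_clk = 0 then (din, reg.1, reg.2.1, reg.2.2.1) else reg
      simALoop inputs ts
        (q0.set t.toNat reg'.1, q1.set t.toNat reg'.2.1,
         q2.set t.toNat reg'.2.2.1, q3.set t.toNat reg'.2.2.2) reg' clk
    | _, _ => none

def sim_cx195 (inputs : List (String × List Int)) (n_ticks : Int) : List (String × List Int) :=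
  let z : List Int := List.replicate n_ticks.toNat 0
  match simALoop inputs (PySem.List.pyRange 0 n_ticks 1) (z, z, z, z) (0, 0, 0, 0) 0 with
  | some (q0, q1, q2, q3) => [("Q0", q0), ("Q1", q1), ("Q2", q2), ("Q3", q3)]
  | none => []

-- ===== PORT B =====
-- B's loop: same per-tick lookups; append DIN to the history on a rising edge and record
-- the history length per tick; outputs are built afterwards by indexed lookup.
def simBLoop (inputs : List (String × List Int)) :
    List Int → List Int → List Nat → Int → Option (List Int × List Nat)
  | [], latched, counts, _ => some (latched, counts)
  | t :: ts, latched, counts, prev_clk =>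
    match ((PySem.Dict.mk inputs).get? "CLK").bind (fun l => PySem.List.pyGet? l t),
          ((PySem.Dict.mk inputs).get? "DIN").bind (fun l => PySem.List.pyGet? l t) with
    | some clk, some din =>
      let latched' := if clk ≠ 0 ∧ prev_clk = 0 then latched ++ [din] else latched
      simBLoop inputs ts latched' (counts ++ [latched'.length]) clk
    | _, _ => none

def sim_cx195_alt (inputs : List (String × List Int)) (n_ticks : Int) : List (String × List Int) :=
  match simBLoop inputs (PySem.List.pyRange 0 n_ticks 1) [] [] 0 with
  | some (latched, counts) =>
    let q : Nat → List Int := fun i =>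
      counts.map (fun c => if i + 1 ≤ c then latched.getD (c - 1 - i) 0 else 0)
    [("Q0", q 0), ("Q1", q 1), ("Q2", q 2), ("Q3", q 3)]
  | none => []

-- ===== PRECONDITION & SPEC =====
-- Pre_ excludes exactly the inputs where A raises: when n_ticks > 0, both 'CLK' and 'DIN'
-- must be present (else KeyError) with at least n_ticks entries (else IndexError).
def Pre_sim_cx195 (inputs : List (String × List Int)) (n_ticks : Int) : Prop :=
  0 < n_ticks →
    n_ticks ≤ ((((PySem.Dict.mk inputs).get? "CLK").getD []).length : Int) ∧
    n_ticks ≤ ((((PySem.Dict.mk inputs).get? "DIN").getD []).length : Int)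
instance (inputs : List (String × List Int)) (n_ticks : Int) : Decidable (Pre_sim_cx195 inputs n_ticks) := by unfold Pre_sim_cx195; infer_instance

def pvWitness_sim_cx195 : (List (String × List Int)) × Int :=
  ([("CLK", [0, 1]), ("DIN", [5, 7])], 2)

def Spec_sim_cx195 (inputs : List (String × List Int)) (n_ticks : Int) (out : List (String × List Int)) : Prop := out = sim_cx195_alt inputs n_ticks
instance (inputs : List (String × List Int)) (n_ticks : Int) (out : List (String × List Int)) : Decidable (Spec_sim_cx195 inputs n_ticks out) := by unfold Spec_sim_cx195; infer_instance

-- ===== CLAIM (what is proved, stated in full; the proofs are below) =====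
def Claim_equal_sim_cx195 : Prop := ∀ (inputs : List (String × List Int)) (n_ticks : Int), Dom_sim_cx195 inputs n_ticks → Pre_sim_cx195 inputs n_ticks → Spec_sim_cx195 inputs n_ticks (sim_cx195 inputs n_ticks)

-- ===== LEMMAS AND PROOFS =====

-- reference run: the register contents after each tick, over already-looked-up lists
def specRun (cl dl : List Int) : Nat → Nat → (Int × Int × Int × Int) → Int → List (Int × Int × Int × Int)
  | _, 0, _, _ => []
  | t0, k + 1, reg, prev =>
    let clk := cl.getD t0 0
    let din := dl.getD t0 0
    let reg' := if clk ≠ 0 ∧ prev = 0 then (din, reg.1, reg.2.1, reg.2.2.1) else reg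
    reg' :: specRun cl dl (t0 + 1) k reg' clk

def ticksL (t0 k : Nat) : List Int := (List.range' t0 k).map Nat.cast

def qval (L : List Int) (c i : Nat) : Int := if i + 1 ≤ c then L.getD (c - 1 - i) 0 else 0

def regFrom (l : List Int) (i : Nat) : Int := qval l l.length i

lemma ticksL_succ (t0 k : Nat) : ticksL t0 (k + 1) = (t0 : Int) :: ticksL (t0 + 1) k := by
  simp [ticksL, List.range'_succ]

lemma qval_append (L δ : List Int) (c i : Nat) (h : c ≤ L.length) :
    qval (L ++ δ) c i = qval L c i := by
  unfold qval
  by_cases hc : i + 1 ≤ c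
  · simp only [hc, if_pos]
    rw [List.getD, List.getD, List.getElem?_append_left (by omega)]
  · simp [hc]

lemma regFrom_append_zero (l : List Int) (x : Int) : regFrom (l ++ [x]) 0 = x := by
  unfold regFrom qval
  simp [List.getD]

lemma regFrom_append_succ (l : List Int) (x : Int) (i : Nat) :
    regFrom (l ++ [x]) (i + 1) = regFrom l i := by
  unfold regFrom qval
  simp only [List.length_append, List.length_singleton]
  by_cases hc : i + 1 ≤ l.length
  · rw [if_pos (by omega), if_pos hc,
      show l.length + 1 - 1 - (i + 1) = l.length - 1 - i from by omega,
      List.getD, List.getD, List.getElem?_append_left (by omega)]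
  · rw [if_neg (by omega), if_neg hc]

lemma simALoop_eq (inputs : List (String × List Int)) (cl dl : List Int)
    (hcl : (PySem.Dict.mk inputs).get? "CLK" = some cl)
    (hdl : (PySem.Dict.mk inputs).get? "DIN" = some dl) :
    ∀ (k t0 : Nat) (p0 p1 p2 p3 : List Int) (reg : Int × Int × Int × Int) (prev : Int),
    t0 + k ≤ cl.length → t0 + k ≤ dl.length →
    p0.length = t0 → p1.length = t0 → p2.length = t0 → p3.length = t0 →
    simALoop inputs (ticksL t0 k)
      (p0 ++ List.replicate k 0, p1 ++ List.replicate k 0,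
       p2 ++ List.replicate k 0, p3 ++ List.replicate k 0) reg prev
    = some (p0 ++ (specRun cl dl t0 k reg prev).map (·.1),
            p1 ++ (specRun cl dl t0 k reg prev).map (·.2.1),
            p2 ++ (specRun cl dl t0 k reg prev).map (·.2.2.1),
            p3 ++ (specRun cl dl t0 k reg prev).map (·.2.2.2)) := by
  intro k
  induction k with
  | zero => intro t0 p0 p1 p2 p3 reg prev _ _ _ _ _ _; simp [ticksL, simALoop, specRun]
  | succ k ih =>
    intro t0 p0 p1 p2 p3 reg prev hc hd h0 h1 h2 h3
    have htc : t0 < cl.length := by omega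
    have htd : t0 < dl.length := by omega
    rw [ticksL_succ]
    simp only [simALoop, hcl, hdl, Option.bind_some, PySem.List.pyGet?_natCast,
      List.getElem?_eq_getElem htc, List.getElem?_eq_getElem htd]
    have hset : ∀ (p : List Int) (v : Int), p.length = t0 →
        (p ++ List.replicate (k + 1) 0).set ((t0 : Int)).toNat v
          = (p ++ [v]) ++ List.replicate k 0 := by
      intro p v hp
      rw [Int.toNat_natCast, List.replicate_succ, List.set_append_right _ _ (by omega)]
      simp [hp]
    rw [hset p0 _ h0, hset p1 _ h1, hset p2 _ h2, hset p3 _ h3,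
      ih (t0 + 1) _ _ _ _ _ _ (by omega) (by omega) (by simp [h0]) (by simp [h1])
        (by simp [h2]) (by simp [h3])]
    show _ = some (p0 ++ (specRun cl dl t0 (k + 1) reg prev).map _,
      p1 ++ (specRun cl dl t0 (k + 1) reg prev).map _,
      p2 ++ (specRun cl dl t0 (k + 1) reg prev).map _,
      p3 ++ (specRun cl dl t0 (k + 1) reg prev).map _)
    simp only [specRun, List.getD_eq_getElem _ _ htc, List.getD_eq_getElem _ _ htd,
      List.map_cons, List.append_assoc, List.singleton_append]

lemma simBLoop_eq (inputs : List (String × List Int)) (cl dl : List Int)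
    (hcl : (PySem.Dict.mk inputs).get? "CLK" = some cl)
    (hdl : (PySem.Dict.mk inputs).get? "DIN" = some dl) :
    ∀ (k t0 : Nat) (latched : List Int) (counts : List Nat) (prev : Int),
    t0 + k ≤ cl.length → t0 + k ≤ dl.length →
    ∃ δ newC,
      simBLoop inputs (ticksL t0 k) latched counts prev
        = some (latched ++ δ, counts ++ newC) ∧
      newC.map (fun c => (qval (latched ++ δ) c 0, qval (latched ++ δ) c 1,
          qval (latched ++ δ) c 2, qval (latched ++ δ) c 3))
        = specRun cl dl t0 k
            (regFrom latched 0, regFrom latched 1, regFrom latched 2, regFrom latched 3) prev := by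
  intro k
  induction k with
  | zero =>
    intro t0 latched counts prev _ _
    exact ⟨[], [], by simp [ticksL, simBLoop], by simp [specRun]⟩
  | succ k ih =>
    intro t0 latched counts prev hc hd
    have htc : t0 < cl.length := by omega
    have htd : t0 < dl.length := by omega
    rw [ticksL_succ]
    simp only [simBLoop, hcl, hdl, Option.bind_some, PySem.List.pyGet?_natCast,
      List.getElem?_eq_getElem htc, List.getElem?_eq_getElem htd]
    set clk := cl[t0] with hclk
    set din := dl[t0] with hdin
    by_cases htrig : clk ≠ 0 ∧ prev = 0
    · obtain ⟨δ', newC', hrun, hmap⟩ :=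
        ih (t0 + 1) (latched ++ [din]) (counts ++ [(latched ++ [din]).length]) clk
          (by omega) (by omega)
      refine ⟨[din] ++ δ', (latched ++ [din]).length :: newC', ?_, ?_⟩
      · rw [if_pos htrig, hrun]; simp
      · rw [List.map_cons]
        have hL : latched ++ ([din] ++ δ') = (latched ++ [din]) ++ δ' := by simp
        rw [hL]
        have hhead : ∀ i, qval ((latched ++ [din]) ++ δ') (latched ++ [din]).length i
            = regFrom (latched ++ [din]) i := fun i =>
          qval_append _ _ _ _ (le_refl _)
        rw [hhead 0, hhead 1, hhead 2, hhead 3, hmap]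
        show _ = specRun cl dl t0 (k + 1) _ prev
        simp only [specRun, List.getD_eq_getElem _ _ htc, List.getD_eq_getElem _ _ htd,
          ← hclk, ← hdin, if_pos htrig]
        rw [regFrom_append_zero, regFrom_append_succ, regFrom_append_succ,
          regFrom_append_succ]
    · obtain ⟨δ', newC', hrun, hmap⟩ :=
        ih (t0 + 1) latched (counts ++ [latched.length]) clk (by omega) (by omega)
      refine ⟨δ', latched.length :: newC', ?_, ?_⟩
      · rw [if_neg htrig, hrun]; simp
      · rw [List.map_cons]
        have hhead : ∀ i, qval (latched ++ δ') latched.length i = regFrom latched i :=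
          fun i => qval_append _ _ _ _ (le_refl _)
        rw [hhead 0, hhead 1, hhead 2, hhead 3, hmap]
        show _ = specRun cl dl t0 (k + 1) _ prev
        simp only [specRun, List.getD_eq_getElem _ _ htc, List.getD_eq_getElem _ _ htd,
          ← hclk, ← hdin, if_neg htrig]

lemma pyRange_nonpos (n : Int) (hn : n ≤ 0) : PySem.List.pyRange 0 n 1 = [] := by
  rw [PySem.List.pyRange_one]
  rw [show (n - 0).toNat = 0 from by omega]
  simp

lemma pyRange_eq_ticksL (n : Int) : PySem.List.pyRange 0 n 1 = ticksL 0 n.toNat := by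
  rw [PySem.List.pyRange_one, List.range_eq_range',
    show (n - 0).toNat = n.toNat from by omega]
  unfold ticksL
  exact List.map_congr_left fun k _ => zero_add (k : Int)

-- ===== VERDICT (by name: the statement is the Claim_ definition above) =====
theorem sim_cx195_spec : Claim_equal_sim_cx195 := by
  intro inputs n _dom hpre
  unfold Spec_sim_cx195
  by_cases hn : n ≤ 0
  · have hz : n.toNat = 0 := by omega
    simp [sim_cx195, sim_cx195_alt, pyRange_nonpos n hn, simALoop, simBLoop, hz]
  · replace hn : 0 < n := by omega
    obtain ⟨hlc, hld⟩ := hpre hn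
    obtain ⟨cl, hcl⟩ : ∃ cl, (PySem.Dict.mk inputs).get? "CLK" = some cl := by
      cases h : (PySem.Dict.mk inputs).get? "CLK" with
      | none => rw [h] at hlc; simp at hlc; omega
      | some cl => exact ⟨cl, rfl⟩
    obtain ⟨dl, hdl⟩ : ∃ dl, (PySem.Dict.mk inputs).get? "DIN" = some dl := by
      cases h : (PySem.Dict.mk inputs).get? "DIN" with
      | none => rw [h] at hld; simp at hld; omega
      | some dl => exact ⟨dl, rfl⟩
    rw [hcl] at hlc; rw [hdl] at hld
    simp only [Option.getD_some] at hlc hld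
    have hbc : 0 + n.toNat ≤ cl.length := by omega
    have hbd : 0 + n.toNat ≤ dl.length := by omega
    have hA := simALoop_eq inputs cl dl hcl hdl n.toNat 0 [] [] [] []
      (0, 0, 0, 0) 0 hbc hbd rfl rfl rfl rfl
    obtain ⟨δ, newC, hrun, hmap⟩ := simBLoop_eq inputs cl dl hcl hdl n.toNat 0 [] [] 0 hbc hbd
    simp only [List.nil_append] at hA hrun hmap
    rw [show ((regFrom ([] : List Int) 0, regFrom ([] : List Int) 1,
        regFrom ([] : List Int) 2, regFrom ([] : List Int) 3) : Int × Int × Int × Int)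
        = ((0 : Int), (0 : Int), (0 : Int), (0 : Int)) from rfl] at hmap
    have hAout : sim_cx195 inputs n
        = [("Q0", (specRun cl dl 0 n.toNat (0, 0, 0, 0) 0).map (·.1)),
           ("Q1", (specRun cl dl 0 n.toNat (0, 0, 0, 0) 0).map (·.2.1)),
           ("Q2", (specRun cl dl 0 n.toNat (0, 0, 0, 0) 0).map (·.2.2.1)),
           ("Q3", (specRun cl dl 0 n.toNat (0, 0, 0, 0) 0).map (·.2.2.2))] := by
      simp only [sim_cx195, pyRange_eq_ticksL]
      rw [hA]
    have hBout : sim_cx195_alt inputs n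
        = [("Q0", newC.map (fun c => if 0 + 1 ≤ c then δ.getD (c - 1 - 0) 0 else 0)),
           ("Q1", newC.map (fun c => if 1 + 1 ≤ c then δ.getD (c - 1 - 1) 0 else 0)),
           ("Q2", newC.map (fun c => if 2 + 1 ≤ c then δ.getD (c - 1 - 2) 0 else 0)),
           ("Q3", newC.map (fun c => if 3 + 1 ≤ c then δ.getD (c - 1 - 3) 0 else 0))] := by
      simp only [sim_cx195_alt, pyRange_eq_ticksL]
      rw [hrun]
    have h0 : newC.map (fun c => if 0 + 1 ≤ c then δ.getD (c - 1 - 0) 0 else 0)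
        = (specRun cl dl 0 n.toNat (0, 0, 0, 0) 0).map (·.1) := by
      rw [← hmap, List.map_map]; exact List.map_congr_left fun c _ => rfl
    have h1 : newC.map (fun c => if 1 + 1 ≤ c then δ.getD (c - 1 - 1) 0 else 0)
        = (specRun cl dl 0 n.toNat (0, 0, 0, 0) 0).map (·.2.1) := by
      rw [← hmap, List.map_map]; exact List.map_congr_left fun c _ => rfl
    have h2 : newC.map (fun c => if 2 + 1 ≤ c then δ.getD (c - 1 - 2) 0 else 0)
        = (specRun cl dl 0 n.toNat (0, 0, 0, 0) 0).map (·.2.2.1) := by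
      rw [← hmap, List.map_map]; exact List.map_congr_left fun c _ => rfl
    have h3 : newC.map (fun c => if 3 + 1 ≤ c then δ.getD (c - 1 - 3) 0 else 0)
        = (specRun cl dl 0 n.toNat (0, 0, 0, 0) 0).map (·.2.2.2) := by
      rw [← hmap, List.map_map]; exact List.map_congr_left fun c _ => rfl
    rw [hAout, hBout, h0, h1, h2, h3]
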